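-- pv_equiv track=rewrite | github.com/juanauli/Inversion-Sequences-Consecutive-Patterns-of-Relations | count_consec_ineq3.py | count_less_great
-- ===== SOURCE A (Python) =====
-- def count_less_great(sequence):
--     index = 0
--     counter = 0
--     while index < len(sequence) - 2:
--         if sequence[index] < sequence[index + 1] > sequence[index + 2]:
--             counter += 1
--         index += 1
--     return counter
-- ===== SOURCE B (Python) =====
-- def count_less_great(sequence):
--     rises = [a < b for a, b in zip(sequence, sequence[1:])]
--     falls = [a > b for a, b in zip(sequence, sequence[1:])]
--     return sum(1 for i in range(len(rises) - 1) if rises[i] and falls[i + 1])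
-- ===== Notes on version B (the rewrite author's own statement) =====
-- stated objective: alternative
-- what changed: Replaces A's single index-walking while loop over triples by two precomputed pairwise comparison tables (rises/falls) built with zip, then a separate pass counting peak positions where rises[i] and falls[i+1] hold.
import Mathlib
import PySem

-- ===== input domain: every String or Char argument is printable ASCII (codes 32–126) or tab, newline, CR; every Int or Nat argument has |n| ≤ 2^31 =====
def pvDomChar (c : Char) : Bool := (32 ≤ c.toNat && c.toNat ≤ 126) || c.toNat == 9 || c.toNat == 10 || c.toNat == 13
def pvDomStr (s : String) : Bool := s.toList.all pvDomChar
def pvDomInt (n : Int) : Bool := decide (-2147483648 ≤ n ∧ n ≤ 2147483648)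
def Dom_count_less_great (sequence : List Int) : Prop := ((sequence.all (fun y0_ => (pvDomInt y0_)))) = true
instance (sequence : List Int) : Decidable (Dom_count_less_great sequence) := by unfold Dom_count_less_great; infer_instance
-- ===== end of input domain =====

-- B precomputes rise/fall comparison tables in one pass and counts peak positions; A scans indices directly. Return-value equivalence only.

-- ===== PORT A =====
-- A: while index < len-2, count triples with seq[index] < seq[index+1] > seq[index+2]
def count_less_great (sequence : List Int) : Int :=
  (List.range (sequence.length - 2)).foldl
    (fun counter index =>
      if sequence.getD index 0 < sequence.getD (index + 1) 0 ∧
         sequence.getD (index + 1) 0 > sequence.getD (index + 2) 0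
      then counter + 1 else counter) 0

-- ===== PORT B =====
def count_less_great_alt (sequence : List Int) : Int :=
  let rises := (sequence.zip sequence.tail).map (fun p => decide (p.1 < p.2))
  let falls := (sequence.zip sequence.tail).map (fun p => decide (p.1 > p.2))
  ((List.range (rises.length - 1)).filter
    (fun i => rises.getD i false && falls.getD (i + 1) false)).length

-- ===== PRECONDITION & SPEC =====
def Spec_count_less_great (sequence : List Int) (out : Int) : Prop := out = count_less_great_alt sequence
instance (sequence : List Int) (out : Int) : Decidable (Spec_count_less_great sequence out) := by unfold Spec_count_less_great; infer_instance

-- ===== CLAIM (what is proved, stated in full; the proofs are below) =====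
def Claim_equal_count_less_great : Prop := ∀ (sequence : List Int), Dom_count_less_great sequence → Spec_count_less_great sequence (count_less_great sequence)

-- ===== LEMMAS AND PROOFS =====

theorem pvFoldCount {p : Nat → Prop} [DecidablePred p] (l : List Nat) (c : Int) :
    l.foldl (fun counter i => if p i then counter + 1 else counter) c
      = c + (l.filter (fun i => decide (p i))).length := by
  induction l generalizing c with
  | nil => simp
  | cons x xs ih =>
      by_cases h : p x
      · simp only [List.foldl_cons, List.filter_cons, h, decide_true, if_pos]
        rw [ih]; push_cast [List.length_cons]; ring
      · simp [h, ih]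

theorem pvZipTailLen (sequence : List Int) :
    (sequence.zip sequence.tail).length = sequence.length - 1 := by
  cases sequence with
  | nil => simp
  | cons x xs => simp [List.length_zip]

theorem pvMapGetD (sequence : List Int) (f : Int × Int → Bool) (i : Nat)
    (h : i + 1 < sequence.length) :
    (((sequence.zip sequence.tail).map f).getD i false)
      = f (sequence.getD i 0, sequence.getD (i + 1) 0) := by
  have hz : i < (sequence.zip sequence.tail).length := by
    rw [pvZipTailLen]; omega
  rw [List.getD_eq_getElem?_getD, List.getElem?_map]
  rw [List.getElem?_eq_getElem hz]
  have hi : i < sequence.length := by omega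
  have ht : i < sequence.tail.length := by
    rw [List.length_tail]; omega
  simp only [List.getElem_zip, Option.map_some, Option.getD_some]
  have h1 : sequence.getD i 0 = sequence[i] := by
    rw [List.getD_eq_getElem?_getD, List.getElem?_eq_getElem hi]; rfl
  have h2 : sequence.getD (i + 1) 0 = sequence.tail[i] := by
    rw [List.getElem_tail, List.getD_eq_getElem?_getD,
      List.getElem?_eq_getElem (by omega : i + 1 < sequence.length)]; rfl
  rw [h1, h2]

-- ===== VERDICT (by name: the statement is the Claim_ definition above) =====
theorem count_less_great_spec : Claim_equal_count_less_great := by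
  intro sequence _
  unfold Spec_count_less_great count_less_great count_less_great_alt
  simp only []
  rw [pvFoldCount]
  have hlen : ((sequence.zip sequence.tail).map
      (fun p => decide (p.1 < p.2))).length - 1 = sequence.length - 2 := by
    rw [List.length_map, pvZipTailLen]; omega
  rw [hlen, zero_add]
  congr 1
  congr 1
  apply List.filter_congr
  intro i hi
  have hi2 : i + 2 < sequence.length := by
    have := List.mem_range.mp hi; omega
  rw [pvMapGetD _ _ _ (by omega), pvMapGetD _ _ _ (by omega)]
  simp
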